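-- pv_equiv track=rewrite | github.com/pypi-data/pypi-mirror-181 | packages/extracto/extracto-0.9.tar.gz/extracto-0.9/extracto/bannable_product.py | bannable_product_3
-- ===== SOURCE A (Python) =====
-- def bannable_product_3(bans, ws, xs, ys):
--     ban_w = bans[0]
--     ban_x = bans[1]
--     ban_y = bans[2]
--
--     for w in ws:
--         if w in ban_w:
--             continue
--         for x in xs:
--             if x in ban_x:
--                 xs = [x for x in xs if not x in ban_x]
--                 continue
--
--             if w in ban_w:
--                 break
--
--             for y in ys:
--                 if y in ban_y:
--                     ys = [y for y in ys if not y in ban_y]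
--                     continue
--
--                 if x in ban_x or w in ban_w:
--                     break
--
--                 yield (w, x, y)
-- ===== SOURCE B (Python) =====
-- def bannable_product_3(bans, ws, xs, ys):
--     # Filter once up front, then enumerate the plain Cartesian product.
--     ban_w = bans[0]
--     ban_x = bans[1]
--     ban_y = bans[2]
--     ws_f = [w for w in ws if w not in ban_w]
--     xs_f = [x for x in xs if x not in ban_x]
--     ys_f = [y for y in ys if y not in ban_y]
--     for w in ws_f:
--         for x in xs_f:
--             for y in ys_f:
--                 yield (w, x, y)
-- ===== Notes on version B (the rewrite author's own statement) =====
-- stated objective: simpler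
-- what changed: B filters each of the three lists against its ban list once up front and then yields the plain Cartesian product of the filtered lists, replacing A's interleaved per-tuple ban tests, mid-loop list reassignments and dead break branches (membership tests move out of the triple loop).
import Mathlib
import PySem

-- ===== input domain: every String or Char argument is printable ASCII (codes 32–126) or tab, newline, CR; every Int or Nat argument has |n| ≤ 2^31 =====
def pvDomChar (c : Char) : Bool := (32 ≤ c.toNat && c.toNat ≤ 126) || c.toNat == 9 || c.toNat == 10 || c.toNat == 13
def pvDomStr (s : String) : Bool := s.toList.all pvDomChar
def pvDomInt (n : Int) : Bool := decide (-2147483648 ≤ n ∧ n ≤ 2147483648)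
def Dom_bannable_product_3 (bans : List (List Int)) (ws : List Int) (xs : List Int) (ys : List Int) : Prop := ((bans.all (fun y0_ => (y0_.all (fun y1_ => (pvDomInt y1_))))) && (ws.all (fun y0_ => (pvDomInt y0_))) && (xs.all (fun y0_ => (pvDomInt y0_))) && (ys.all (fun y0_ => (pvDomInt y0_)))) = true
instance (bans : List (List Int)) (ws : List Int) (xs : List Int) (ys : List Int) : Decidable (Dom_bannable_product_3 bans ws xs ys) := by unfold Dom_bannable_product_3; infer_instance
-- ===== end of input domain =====

-- B filters each list once up front and yields the plain triple product (simpler);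
-- A interleaves ban tests, mid-loop list reassignments and dead breaks. Return value only (generators consumed to lists).

-- ===== PORT A =====
-- innermost `for y in ys` loop: state = (current ys binding, accumulated output)
def aInner (ban_w ban_x ban_y : List Int) (w x : Int) :
    List Int → List Int → List (Int × Int × Int) → List Int × List (Int × Int × Int)
  | [], ys, out => (ys, out)
  | y :: rest, ys, out =>
    if y ∈ ban_y then
      aInner ban_w ban_x ban_y w x rest (ys.filter (fun a => decide (a ∉ ban_y))) out
    else if x ∈ ban_x ∨ w ∈ ban_w then (ys, out)   -- break
    else aInner ban_w ban_x ban_y w x rest ys (out ++ [(w, x, y)])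

-- middle `for x in xs` loop: state = (current xs binding, current ys binding, output)
def aMid (ban_w ban_x ban_y : List Int) (w : Int) :
    List Int → List Int → List Int → List (Int × Int × Int) →
    List Int × List Int × List (Int × Int × Int)
  | [], xs, ys, out => (xs, ys, out)
  | x :: rest, xs, ys, out =>
    if x ∈ ban_x then
      aMid ban_w ban_x ban_y w rest (xs.filter (fun a => decide (a ∉ ban_x))) ys out
    else if w ∈ ban_w then (xs, ys, out)           -- break
    else
      let r := aInner ban_w ban_x ban_y w x ys ys out
      aMid ban_w ban_x ban_y w rest xs r.1 r.2

-- outer `for w in ws` loop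
def aOuter (ban_w ban_x ban_y : List Int) :
    List Int → List Int → List Int → List (Int × Int × Int) → List (Int × Int × Int)
  | [], _, _, out => out
  | w :: rest, xs, ys, out =>
    if w ∈ ban_w then aOuter ban_w ban_x ban_y rest xs ys out
    else
      let r := aMid ban_w ban_x ban_y w xs xs ys out
      aOuter ban_w ban_x ban_y rest r.1 r.2.1 r.2.2

-- bans[0..2] totalised with getD []; Pre_ guarantees the indices are in range
def bannable_product_3 (bans : List (List Int)) (ws : List Int) (xs : List Int) (ys : List Int) : List (Int × Int × Int) :=
  let ban_w := (PySem.List.pyGet? bans 0).getD []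
  let ban_x := (PySem.List.pyGet? bans 1).getD []
  let ban_y := (PySem.List.pyGet? bans 2).getD []
  aOuter ban_w ban_x ban_y ws xs ys []

-- ===== PORT B =====
def bannable_product_3_alt (bans : List (List Int)) (ws : List Int) (xs : List Int) (ys : List Int) : List (Int × Int × Int) :=
  let ban_w := (PySem.List.pyGet? bans 0).getD []
  let ban_x := (PySem.List.pyGet? bans 1).getD []
  let ban_y := (PySem.List.pyGet? bans 2).getD []
  let ws_f := ws.filter (fun a => decide (a ∉ ban_w))
  let xs_f := xs.filter (fun a => decide (a ∉ ban_x))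
  let ys_f := ys.filter (fun a => decide (a ∉ ban_y))
  ws_f.flatMap (fun w => xs_f.flatMap (fun x => ys_f.map (fun y => (w, x, y))))

-- ===== PRECONDITION & SPEC =====
-- Pre_ excludes bans with fewer than 3 elements, on which Python A raises IndexError.
def Pre_bannable_product_3 (bans : List (List Int)) (ws : List Int) (xs : List Int) (ys : List Int) : Prop :=
  3 ≤ bans.length
instance (bans : List (List Int)) (ws : List Int) (xs : List Int) (ys : List Int) : Decidable (Pre_bannable_product_3 bans ws xs ys) := by unfold Pre_bannable_product_3; infer_instance
def pvWitness_bannable_product_3 : List (List Int) × List Int × List Int × List Int :=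
  ([[1], [2], [3]], [0, 1], [2, 4], [3, 5])
def Spec_bannable_product_3 (bans : List (List Int)) (ws : List Int) (xs : List Int) (ys : List Int) (out : List (Int × Int × Int)) : Prop := out = bannable_product_3_alt bans ws xs ys
instance (bans : List (List Int)) (ws : List Int) (xs : List Int) (ys : List Int) (out : List (Int × Int × Int)) : Decidable (Spec_bannable_product_3 bans ws xs ys out) := by unfold Spec_bannable_product_3; infer_instance

-- ===== CLAIM (what is proved, stated in full; the proofs are below) =====
def Claim_equal_bannable_product_3 : Prop := ∀ (bans : List (List Int)) (ws : List Int) (xs : List Int) (ys : List Int), Dom_bannable_product_3 bans ws xs ys → Pre_bannable_product_3 bans ws xs ys → Spec_bannable_product_3 bans ws xs ys (bannable_product_3 bans ws xs ys)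

-- ===== LEMMAS AND PROOFS =====

theorem inner_spec (ban_w ban_x ban_y : List Int) (w x : Int)
    (hw : w ∉ ban_w) (hx : x ∉ ban_x) :
    ∀ (it ys : List Int) (out : List (Int × Int × Int)),
      (aInner ban_w ban_x ban_y w x it ys out).1.filter (fun a => decide (a ∉ ban_y))
        = ys.filter (fun a => decide (a ∉ ban_y)) ∧
      (aInner ban_w ban_x ban_y w x it ys out).2
        = out ++ (it.filter (fun a => decide (a ∉ ban_y))).map (fun y => (w, x, y)) := by
  intro it
  induction it with
  | nil => intro ys out; simp [aInner]
  | cons y rest ih =>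
    intro ys out
    by_cases hy : y ∈ ban_y
    · have h := ih (ys.filter (fun a => decide (a ∉ ban_y))) out
      simp [aInner, hy] at h ⊢
      exact h
    · simp [aInner, hy, hx, hw]
      have h := ih ys (out ++ [(w, x, y)])
      simp at h
      simpa [List.append_assoc] using h

theorem mid_spec (ban_w ban_x ban_y : List Int) (w : Int) (hw : w ∉ ban_w) :
    ∀ (it xs ys : List Int) (out : List (Int × Int × Int)),
      (aMid ban_w ban_x ban_y w it xs ys out).1.filter (fun a => decide (a ∉ ban_x))
        = xs.filter (fun a => decide (a ∉ ban_x)) ∧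
      (aMid ban_w ban_x ban_y w it xs ys out).2.1.filter (fun a => decide (a ∉ ban_y))
        = ys.filter (fun a => decide (a ∉ ban_y)) ∧
      (aMid ban_w ban_x ban_y w it xs ys out).2.2
        = out ++ (it.filter (fun a => decide (a ∉ ban_x))).flatMap
            (fun x => (ys.filter (fun a => decide (a ∉ ban_y))).map (fun y => (w, x, y))) := by
  intro it
  induction it with
  | nil => intro xs ys out; simp [aMid]
  | cons x rest ih =>
    intro xs ys out
    by_cases hx : x ∈ ban_x
    · have h := ih (xs.filter (fun a => decide (a ∉ ban_x))) ys out
      simp [aMid, hx] at h ⊢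
      exact h
    · have hin := inner_spec ban_w ban_x ban_y w x hw hx ys ys out
      have h := ih xs (aInner ban_w ban_x ban_y w x ys ys out).1
        (aInner ban_w ban_x ban_y w x ys ys out).2
      simp at hin
      simp only [decide_not] at h ⊢
      rw [hin.1] at h
      simp [aMid, hx, hw]
      rw [hin.2]
      rw [hin.2] at h
      simpa [List.append_assoc] using h

theorem outer_spec (ban_w ban_x ban_y : List Int) :
    ∀ (it xs ys : List Int) (out : List (Int × Int × Int)),
      aOuter ban_w ban_x ban_y it xs ys out
        = out ++ (it.filter (fun a => decide (a ∉ ban_w))).flatMap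
            (fun w => (xs.filter (fun a => decide (a ∉ ban_x))).flatMap
              (fun x => (ys.filter (fun a => decide (a ∉ ban_y))).map (fun y => (w, x, y)))) := by
  intro it
  induction it with
  | nil => intro xs ys out; simp [aOuter]
  | cons w rest ih =>
    intro xs ys out
    by_cases hw : w ∈ ban_w
    · simpa [aOuter, hw] using ih xs ys out
    · have hm := mid_spec ban_w ban_x ban_y w hw xs xs ys out
      have h := ih (aMid ban_w ban_x ban_y w xs xs ys out).1
        (aMid ban_w ban_x ban_y w xs xs ys out).2.1
        (aMid ban_w ban_x ban_y w xs xs ys out).2.2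
      simp at hm
      simp only [decide_not] at h ⊢
      rw [hm.1, hm.2.1] at h
      simp [aOuter, hw]
      rw [hm.2.2]
      rw [hm.2.2] at h
      simpa [List.append_assoc] using h

-- ===== VERDICT (by name: the statement is the Claim_ definition above) =====
theorem bannable_product_3_spec : Claim_equal_bannable_product_3 := by
  intro bans ws xs ys _ _
  unfold Spec_bannable_product_3 bannable_product_3 bannable_product_3_alt
  simpa using outer_spec _ _ _ ws xs ys []
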